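-- pv_equiv track=rewrite | github.com/henrywatkins/python-euler | euler_problems.py | problem_30
-- ===== SOURCE A (Python) =====
-- def problem_30(p: int) -> int:
--     unique_power_sums = []
--     vals = [i ** p for i in range(10)]
--     max_N = 100000
--     for i in range(2, max_N):
--         digits = [int(j) for j in str(i)]
--         power_sum = sum([vals[k] for k in digits])
--         if power_sum == i:
--             unique_power_sums.append(i)
--     return sum(unique_power_sums)
-- ===== SOURCE B (Python) =====
-- def _digits_sorted(n: int) -> list:
--     ds = []
--     while n > 0:
--         ds.append(n % 10)
--         n //= 10
--     ds.sort()
--     return ds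
--
--
-- def _combos(lo: int, length: int, combo: list) -> list:
--     if length == 0:
--         return [combo]
--     res = []
--     for d in range(lo, 10):
--         res += _combos(d, length - 1, combo + [d])
--     return res
--
--
-- def problem_30(p: int) -> int:
--     vals = [d ** p for d in range(10)]
--     total = 0
--     for length in range(1, 6):
--         for combo in _combos(0, length, []):
--             s = sum(vals[d] for d in combo)
--             if 2 <= s < 100000 and _digits_sorted(s) == combo:
--                 total += s
--     return total
-- ===== Notes on version B (the rewrite author's own statement) =====
-- stated objective: faster
-- what changed: Instead of scanning every integer below the fixed bound and recomputing its digit power sum from its decimal string, B enumerates the nondecreasing digit combinations of length one to five, takes each combination's power sum and keeps it when its own sorted digit list equals the combination.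
import Mathlib
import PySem

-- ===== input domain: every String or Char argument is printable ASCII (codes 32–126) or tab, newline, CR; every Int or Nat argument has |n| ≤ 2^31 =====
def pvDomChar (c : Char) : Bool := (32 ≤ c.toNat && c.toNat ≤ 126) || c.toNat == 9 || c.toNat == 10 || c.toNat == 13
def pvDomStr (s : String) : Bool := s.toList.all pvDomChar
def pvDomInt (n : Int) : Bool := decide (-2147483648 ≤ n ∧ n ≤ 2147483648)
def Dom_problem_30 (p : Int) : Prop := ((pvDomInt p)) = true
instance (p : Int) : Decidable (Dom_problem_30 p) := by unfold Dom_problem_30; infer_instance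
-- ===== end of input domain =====

-- B replaces A's brute-force scan of every candidate below the fixed bound by an
-- enumeration of the nondecreasing digit combinations (objective: faster, measured).
-- Equivalence of the return values is proved on Pre_ (0 ≤ p); for p < 0 the Python A
-- raises ZeroDivisionError (0 ** p), and so does B.

-- ===== PORT A =====
-- str(i) is iterated character by character and int(j) applied to each one-character
-- string; ports as PySem.Int.toChars (= (toStr i).toList by PySem.Int.toList_toStr) and
-- PySem.Int.ofChars? [c].  The .getD 0 never fires on the loop's inputs (every
-- character of str(i) for i ≥ 2 is a decimal digit).  i ** p ports as i ^ p.toNat,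
-- exact for 0 ≤ p (Pre_); for p < 0 Python raises ZeroDivisionError at 0 ** p.
def problem_30 (p : Int) : Int :=
  let vals := (PySem.List.pyRange 0 10 1).map (fun i => i ^ p.toNat)
  let unique_power_sums := (PySem.List.pyRange 2 100000 1).foldl
    (fun acc i =>
      let digits := (PySem.Int.toChars i).map (fun c => (PySem.Int.ofChars? [c]).getD 0)
      let power_sum := (digits.map (fun k => PySem.List.pyGetD vals k 0)).sum
      if power_sum = i then acc ++ [i] else acc) []
  unique_power_sums.sum

-- ===== PORT B =====
-- the while-loop of _digits_sorted, least-significant digit first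
def pvDigitsRev (n : Int) : List Int :=
  if _h : 0 < n then PySem.Int.mod n 10 :: pvDigitsRev (PySem.Int.floordiv n 10) else []
termination_by n.toNat
decreasing_by simp only [PySem.Int.floordiv_eq_ediv_of_pos (by omega : (0:Int) < 10)]; omega

def pvDigitsSorted (n : Int) : List Int :=
  PySem.List.sorted (pvDigitsRev n) (fun x => x) false

-- _combos: all nondecreasing digit lists of the given length with entries in [lo, 10)
def pvCombos (lo : Int) (length : Nat) (combo : List Int) : List (List Int) :=
  match length with
  | 0 => [combo]
  | Nat.succ l =>
      (PySem.List.pyRange lo 10 1).foldl (fun res d => res ++ pvCombos d l (combo ++ [d])) []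
termination_by length

def problem_30_alt (p : Int) : Int :=
  let vals := (PySem.List.pyRange 0 10 1).map (fun d => d ^ p.toNat)
  (PySem.List.pyRange 1 6 1).foldl (fun total len =>
    (pvCombos 0 len.toNat []).foldl (fun total combo =>
      let s := (combo.map (fun d => PySem.List.pyGetD vals d 0)).sum
      if 2 ≤ s ∧ s < 100000 ∧ pvDigitsSorted s = combo then total + s else total) total) 0

-- ===== PRECONDITION & SPEC =====
-- Pre_ excludes exactly p < 0, where the Python A raises ZeroDivisionError at 0 ** p
-- (and the Python B raises the same exception there).
def Pre_problem_30 (p : Int) : Prop := 0 ≤ p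
instance (p : Int) : Decidable (Pre_problem_30 p) := by unfold Pre_problem_30; infer_instance
def pvWitness_problem_30 : Int := 4

def Spec_problem_30 (p : Int) (out : Int) : Prop := out = problem_30_alt p
instance (p : Int) (out : Int) : Decidable (Spec_problem_30 p out) := by unfold Spec_problem_30; infer_instance

-- ===== CLAIM (what is proved, stated in full; the proofs are below) =====
def Claim_equal_problem_30 : Prop :=
  ∀ (p : Int), Dom_problem_30 p → Pre_problem_30 p → Spec_problem_30 p (problem_30 p)

-- ===== LEMMAS AND PROOFS =====

-- the value int(j) gives for a one-character string j
def pvCharVal (c : Char) : Int := (PySem.Int.ofChars? [c]).getD 0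

-- digits of a natural number, least significant first, as integers
def pvNdig (n : Nat) : List Int := (Nat.digits 10 n).map (fun d : Nat => (d : Int))

def pvSumG (g : Int → Int) (c : List Int) : Int := (c.map g).sum
def pvPsumG (g : Int → Int) (i : Int) : Int := ((pvNdig i.toNat).map g).sum
abbrev pvCondB (g : Int → Int) (c : List Int) : Prop :=
  2 ≤ pvSumG g c ∧ pvSumG g c < 100000 ∧ pvDigitsSorted (pvSumG g c) = c
def pvQ (g : Int → Int) (L : Nat) : List (List Int) :=
  (pvCombos 0 L []).filter (fun c => decide (pvCondB g c))

theorem pvCharVal_digitChar (d : Nat) (hd : d < 10) : pvCharVal (Nat.digitChar d) = (d : Int) := by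
  interval_cases d <;> decide

theorem pvToChars_natCast (m : Nat) : PySem.Int.toChars (m : Int) = Nat.toDigits 10 m := by
  simp [PySem.Int.toChars]

theorem pvSdig_eq (n : Nat) (hn : 0 < n) :
    (PySem.Int.toChars (n : Int)).map pvCharVal = (pvNdig n).reverse := by
  induction n using Nat.strong_induction_on with
  | _ n ih =>
    have h10 : (1:Nat) < 10 := by omega
    rw [pvToChars_natCast]
    by_cases h : n < 10
    · rw [Nat.toDigits_of_lt_base h, pvNdig, Nat.digits_def' h10 hn]
      have h0 : n / 10 = 0 := Nat.div_eq_of_lt h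
      simp [h0, Nat.mod_eq_of_lt h, pvCharVal_digitChar n h]
    · rw [Nat.toDigits_of_base_le h10 (by omega), pvNdig, Nat.digits_def' h10 hn]
      have hpos : 0 < n / 10 := Nat.div_pos (by omega) (by omega)
      have hmap := ih (n / 10) (by omega) hpos
      rw [pvToChars_natCast] at hmap
      simp [List.map_append, hmap, pvCharVal_digitChar _ (Nat.mod_lt _ (by omega)), pvNdig]

theorem pvDigitsRev_eq (n : Nat) : pvDigitsRev (n : Int) = pvNdig n := by
  induction n using Nat.strong_induction_on with
  | _ n ih =>
    rw [pvDigitsRev]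
    by_cases hn : 0 < n
    · rw [dif_pos (by exact_mod_cast hn)]
      rw [show PySem.Int.mod (n:Int) 10 = ((n % 10 : Nat) : Int) from by
            exact_mod_cast PySem.Int.mod_natCast n 10,
          show PySem.Int.floordiv (n:Int) 10 = ((n / 10 : Nat) : Int) from by
            exact_mod_cast PySem.Int.floordiv_natCast n 10]
      rw [ih (n / 10) (by omega)]
      simp only [pvNdig, Nat.digits_def' (by omega : (1:Nat) < 10) hn, List.map_cons]
    · rw [dif_neg (by omega)]
      have : n = 0 := by omega
      subst this
      simp [pvNdig]

theorem pvNdig_lt (n : Nat) {d : Int} (hd : d ∈ pvNdig n) : 0 ≤ d ∧ d < 10 := by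
  rw [pvNdig] at hd
  obtain ⟨d0, hd0, rfl⟩ := List.mem_map.mp hd
  have := Nat.digits_lt_base (by omega : (1:Nat) < 10) hd0
  omega

theorem pvCombos_succ (lo : Int) (l : Nat) (combo : List Int) :
    pvCombos lo (l+1) combo
      = (PySem.List.pyRange lo 10 1).flatMap (fun d => pvCombos d l (combo ++ [d])) := by
  rw [pvCombos, PySem.List.foldl_append_eq_flatMap]
  simp

theorem pvCombos_eq_map (l : Nat) : ∀ (lo : Int) (combo : List Int),
    pvCombos lo l combo = (pvCombos lo l []).map (combo ++ ·) := by
  induction l with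
  | zero => intro lo combo; simp [pvCombos]
  | succ l ih =>
    intro lo combo
    rw [pvCombos_succ, pvCombos_succ, List.map_flatMap]
    congr 1
    funext d
    rw [ih d (combo ++ [d]), ih d ([] ++ [d]), List.map_map]
    congr 1
    funext x
    simp [List.append_assoc]

theorem pvCombos_succ_nil (lo : Int) (l : Nat) :
    pvCombos lo (l+1) [] = (PySem.List.pyRange lo 10 1).flatMap
      (fun d => (pvCombos d l []).map (fun c => d :: c)) := by
  rw [pvCombos_succ]
  simp only [List.nil_append]
  congr 1
  funext d
  rw [pvCombos_eq_map]
  simp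

theorem pvMem_pvCombos (l : Nat) : ∀ (lo : Int) (c : List Int),
    c ∈ pvCombos lo l [] ↔
      c.length = l ∧ c.Pairwise (· ≤ ·) ∧ ∀ d ∈ c, lo ≤ d ∧ d < 10 := by
  induction l with
  | zero =>
    intro lo c
    constructor
    · intro h; simp [pvCombos] at h; subst h; simp
    · intro ⟨h1, _, _⟩
      have : c = [] := List.eq_nil_of_length_eq_zero h1
      subst this; simp [pvCombos]
  | succ l ih =>
    intro lo c
    rw [pvCombos_succ_nil, List.mem_flatMap]
    constructor
    · rintro ⟨d, hd, hc⟩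
      rw [PySem.List.mem_pyRange_one] at hd
      obtain ⟨c', hc', rfl⟩ := List.mem_map.mp hc
      rw [ih d c'] at hc'
      obtain ⟨hlen, hpw, hbd⟩ := hc'
      refine ⟨by simp [hlen], ?_, ?_⟩
      · exact List.pairwise_cons.mpr ⟨fun x hx => (hbd x hx).1, hpw⟩
      · rintro x hx
        rcases List.mem_cons.mp hx with rfl | hx
        · exact ⟨hd.1, hd.2⟩
        · have := hbd x hx; omega
    · rintro ⟨hlen, hpw, hbd⟩
      cases c with
      | nil => simp at hlen
      | cons d c' =>
        have hd := hbd d (by simp)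
        refine ⟨d, PySem.List.mem_pyRange_one.mpr ⟨hd.1, hd.2⟩, ?_⟩
        refine List.mem_map.mpr ⟨c', ?_, rfl⟩
        rw [ih d c']
        obtain ⟨hle, hpw2⟩ := List.pairwise_cons.mp hpw
        exact ⟨by simpa using hlen, hpw2, fun x hx => ⟨hle x hx, (hbd x (by simp [hx])).2⟩⟩

theorem pvNodup_pvCombos (l : Nat) : ∀ (lo : Int), (pvCombos lo l []).Nodup := by
  induction l with
  | zero => intro lo; simp [pvCombos]
  | succ l ih =>
    intro lo
    rw [pvCombos_succ_nil, List.nodup_flatMap]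
    constructor
    · intro d _
      exact (ih d).map_on (fun x _ y _ h => by simpa using h)
    · apply List.Pairwise.imp ?_ (PySem.List.nodup_pyRange_one lo 10)
      intro a b hab x hxa hxb
      obtain ⟨ca, _, rfl⟩ := List.mem_map.mp hxa
      obtain ⟨cb, _, h⟩ := List.mem_map.mp hxb
      exact hab (List.head_eq_of_cons_eq h.symm ▸ rfl)

theorem pvLookup (e : Nat) (k : Int) (h0 : 0 ≤ k) (h10 : k < 10) :
    PySem.List.pyGetD ((PySem.List.pyRange 0 10 1).map (fun d => d ^ e)) k 0 = k ^ e :=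
  PySem.List.pyGetD_map_pyRange_of_nonneg _ 10 k 0 h0 h10

theorem pvA_powerSum (e : Nat) (i : Int) (hi : 0 < i) :
    (((PySem.Int.toChars i).map (fun c => (PySem.Int.ofChars? [c]).getD 0)).map
      (fun k => PySem.List.pyGetD ((PySem.List.pyRange 0 10 1).map (fun d => d ^ e)) k 0)).sum
    = pvPsumG (fun d => d ^ e) i := by
  have h1 : (fun c => (PySem.Int.ofChars? [c]).getD 0) = pvCharVal := rfl
  rw [h1]
  rw [show PySem.Int.toChars i = PySem.Int.toChars ((i.toNat : Nat) : Int) from by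
        rw [Int.toNat_of_nonneg (by omega)]]
  rw [pvSdig_eq i.toNat (by omega)]
  rw [List.map_reverse, List.sum_reverse]
  rw [pvPsumG]
  congr 1
  apply List.map_congr_left
  intro k hk
  have := pvNdig_lt i.toNat hk
  exact pvLookup e k this.1 this.2

theorem pvFoldl_filter_sum (l : List (List Int)) (P : List Int → Prop) [DecidablePred P]
    (f : List Int → Int) (t0 : Int) :
    l.foldl (fun t c => if P c then t + f c else t) t0
      = t0 + ((l.filter (fun c => decide (P c))).map f).sum := by
  induction l generalizing t0 with
  | nil => simp
  | cons c l ih =>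
    by_cases h : P c <;> simp [List.foldl_cons, ih, h, add_assoc]

theorem pvStepA (p : Int) :
    problem_30 p = ((PySem.List.pyRange 2 100000 1).filter
      (fun i => decide (pvPsumG (fun d => d ^ p.toNat) i = i))).sum := by
  rw [problem_30]
  rw [PySem.List.foldl_congr_mem _ _
    (fun acc i => if decide (pvPsumG (fun d => d ^ p.toNat) i = i) = true
      then acc ++ [i] else acc) _ ?_]
  · rw [PySem.List.foldl_append_if]
    simp
  · intro acc i hi
    rw [PySem.List.mem_pyRange_one] at hi
    have := pvA_powerSum p.toNat i (by omega)
    simp only [this]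
    by_cases h : pvPsumG (fun d => d ^ p.toNat) i = i <;> simp [h]


theorem pvInner (e : Nat) (L : Nat) (t0 : Int) :
    (pvCombos 0 L []).foldl (fun total combo =>
      if 2 ≤ (combo.map (fun d => PySem.List.pyGetD
              ((PySem.List.pyRange 0 10 1).map (fun d => d ^ e)) d 0)).sum ∧
         (combo.map (fun d => PySem.List.pyGetD
              ((PySem.List.pyRange 0 10 1).map (fun d => d ^ e)) d 0)).sum < 100000 ∧
         pvDigitsSorted ((combo.map (fun d => PySem.List.pyGetD
              ((PySem.List.pyRange 0 10 1).map (fun d => d ^ e)) d 0)).sum) = combo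
      then total + (combo.map (fun d => PySem.List.pyGetD
              ((PySem.List.pyRange 0 10 1).map (fun d => d ^ e)) d 0)).sum
      else total) t0
    = t0 + ((pvQ (fun d => d ^ e) L).map (pvSumG (fun d => d ^ e))).sum := by
  rw [PySem.List.foldl_congr_mem _ _
    (fun total combo => if pvCondB (fun d => d ^ e) combo
      then total + pvSumG (fun d => d ^ e) combo else total) _ ?_]
  · exact pvFoldl_filter_sum _ _ _ _
  · intro acc c hc
    have hmem := (pvMem_pvCombos L 0 c).mp hc
    have hs : (c.map (fun d => PySem.List.pyGetD
        ((PySem.List.pyRange 0 10 1).map (fun d => d ^ e)) d 0)).sum = pvSumG (fun d => d ^ e) c := by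
      unfold pvSumG
      congr 1
      apply List.map_congr_left
      intro k hk
      have := hmem.2.2 k hk
      exact pvLookup e k this.1 this.2
    rw [hs]

theorem pvStepB (p : Int) :
    problem_30_alt p = (([1, 2, 3, 4, 5] : List Nat).map
      (fun L => ((pvQ (fun d => d ^ p.toNat) L).map (pvSumG (fun d => d ^ p.toNat))).sum)).sum := by
  rw [problem_30_alt]
  rw [show PySem.List.pyRange 1 6 1 = [1, 2, 3, 4, 5] from by decide]
  simp only [List.foldl_cons, List.foldl_nil]
  norm_num [pvInner, show Int.toNat 2 = 2 from rfl, show Int.toNat 3 = 3 from rfl,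
    show Int.toNat 4 = 4 from rfl, show Int.toNat 5 = 5 from rfl]
  ring

theorem pvQ_mem {g : Int → Int} {L : Nat} {c : List Int} (hc : c ∈ pvQ g L) :
    c ∈ pvCombos 0 L [] ∧ pvCondB g c := by
  rw [pvQ, List.mem_filter] at hc
  exact ⟨hc.1, of_decide_eq_true hc.2⟩

theorem pvDigitsSorted_nonneg (s : Int) (hs : 0 ≤ s) :
    pvDigitsSorted s = PySem.List.sorted (pvNdig s.toNat) (fun x => x) false := by
  rw [pvDigitsSorted, show s = ((s.toNat : Nat) : Int) from (Int.toNat_of_nonneg hs).symm,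
    pvDigitsRev_eq]
  congr 2

theorem pvPerm_of_sorted {s : Int} {c : List Int} (hs : 0 ≤ s) (h : pvDigitsSorted s = c) :
    c.Perm (pvNdig s.toNat) := by
  rw [pvDigitsSorted_nonneg s hs] at h
  rw [← h]
  exact PySem.List.sorted_perm _ _ _

theorem pvQ_psum (g : Int → Int) {L : Nat} {c : List Int} (hc : c ∈ pvQ g L) :
    pvPsumG g (pvSumG g c) = pvSumG g c := by
  obtain ⟨-, h2, h5, hsort⟩ := pvQ_mem hc
  have hperm := pvPerm_of_sorted (by omega) hsort
  rw [pvPsumG]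
  rw [← (hperm.map g).sum_eq]
  rfl

theorem pvMemM_iff (g : Int → Int) (x : Int) :
    (∃ L ∈ ([1,2,3,4,5] : List Nat), ∃ c ∈ pvQ g L, pvSumG g c = x)
      ↔ (2 ≤ x ∧ x < 100000) ∧ pvPsumG g x = x := by
  constructor
  · rintro ⟨L, -, c, hc, rfl⟩
    obtain ⟨-, h2, h5, -⟩ := pvQ_mem hc
    exact ⟨⟨h2, h5⟩, pvQ_psum g hc⟩
  · rintro ⟨⟨h2, h5⟩, hp⟩
    set c := pvDigitsSorted x with hcdef
    have hperm : c.Perm (pvNdig x.toNat) := pvPerm_of_sorted (by omega) rfl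
    have hsum : pvSumG g c = x := by
      rw [pvSumG, (hperm.map g).sum_eq]
      exact hp
    have hlen1 : 1 ≤ c.length := by
      rw [hperm.length_eq, pvNdig, List.length_map]
      have : Nat.digits 10 x.toNat ≠ [] := Nat.digits_ne_nil_iff_ne_zero.mpr (by omega)
      have := List.length_pos_of_ne_nil this
      omega
    have hlen5 : c.length ≤ 5 := by
      rw [hperm.length_eq, pvNdig, List.length_map]
      rw [Nat.digits_length_le_iff (by omega)]
      omega
    refine ⟨c.length, ?_, c, ?_, hsum⟩
    · simp only [List.mem_cons]
      omega
    · rw [pvQ, List.mem_filter]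
      constructor
      · rw [pvMem_pvCombos]
        refine ⟨rfl, ?_, ?_⟩
        · have := PySem.List.sorted_pairwise (pvDigitsRev x) (fun x => x)
          rw [pvDigitsSorted] at hcdef
          rw [hcdef]
          exact this
        · intro d hd
          have := pvNdig_lt x.toNat (hperm.mem_iff.mp hd)
          omega
      · rw [decide_eq_true_eq, pvCondB, hsum]
        exact ⟨h2, h5, rfl⟩

theorem pvNodupM (g : Int → Int) :
    ((([1,2,3,4,5] : List Nat).flatMap (pvQ g)).map (pvSumG g)).Nodup := by
  have hall : ∀ c ∈ ([1,2,3,4,5] : List Nat).flatMap (pvQ g),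
      pvDigitsSorted (pvSumG g c) = c := by
    intro c hc
    obtain ⟨L, -, hc⟩ := List.mem_flatMap.mp hc
    exact (pvQ_mem hc).2.2.2
  apply List.Nodup.map_on
  · intro x hx y hy hxy
    rw [← hall x hx, ← hall y hy, hxy]
  · rw [List.nodup_flatMap]
    constructor
    · intro L _
      exact (pvNodup_pvCombos L 0).filter _
    · have hnd : ([1,2,3,4,5] : List Nat).Pairwise (· ≠ ·) := by decide
      apply List.Pairwise.imp ?_ hnd
      intro a b hab x hxa hxb
      have ha := ((pvMem_pvCombos a 0 x).mp (pvQ_mem hxa).1).1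
      have hb := ((pvMem_pvCombos b 0 x).mp (pvQ_mem hxb).1).1
      exact hab (ha ▸ hb ▸ rfl)

theorem pvBijection (g : Int → Int) :
    (([1, 2, 3, 4, 5] : List Nat).map (fun L => ((pvQ g L).map (pvSumG g)).sum)).sum
      = ((PySem.List.pyRange 2 100000 1).filter (fun i => decide (pvPsumG g i = i))).sum := by
  have hperm : ((([1,2,3,4,5] : List Nat).flatMap (pvQ g)).map (pvSumG g)).Perm
      ((PySem.List.pyRange 2 100000 1).filter (fun i => decide (pvPsumG g i = i))) := by
    rw [List.perm_ext_iff_of_nodup (pvNodupM g)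
      ((PySem.List.nodup_pyRange_one 2 100000).filter _)]
    intro x
    rw [List.mem_filter, PySem.List.mem_pyRange_one, decide_eq_true_eq]
    rw [List.mem_map]
    constructor
    · rintro ⟨c, hc, rfl⟩
      obtain ⟨L, hL, hc⟩ := List.mem_flatMap.mp hc
      have := (pvMemM_iff g (pvSumG g c)).mp ⟨L, hL, c, hc, rfl⟩
      exact ⟨⟨this.1.1, this.1.2⟩, this.2⟩
    · rintro ⟨⟨h2, h5⟩, hp⟩
      obtain ⟨L, hL, c, hc, hs⟩ := (pvMemM_iff g x).mpr ⟨⟨h2, h5⟩, hp⟩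
      exact ⟨c, List.mem_flatMap.mpr ⟨L, hL, hc⟩, hs⟩
  rw [← hperm.sum_eq]
  simp [List.flatMap_cons, List.flatMap_nil, List.map_append, List.sum_append]

-- ===== VERDICT (by name: the statement is the Claim_ definition above) =====
theorem problem_30_spec : Claim_equal_problem_30 := by
  intro p _ _
  unfold Spec_problem_30
  rw [pvStepA, pvStepB, pvBijection]
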